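-- pv_equiv track=rewrite | github.com/UKPLab/germeval2017-sentiment-detection | mtl-sequence-tagging-framework/src/shared_modules/eval/argmin_components.py | readDocsFine
-- ===== SOURCE A (Python) =====
-- def readDocsFine(lines, field, delimiter="\t"):
--     docs = []
--     doc = [[]]
--     argTypes = []
--     atype = []
--     lastLabel = None
--     for line in lines:
--         line = line.strip()
--         if line == "":
--             if doc != [[]]:
--                 docs.append(doc)
--                 argTypes.append(atype)
--             doc = [[]]
--             atype = []
--             lastLabel = None
--         else:
--             x = line.split(delimiter)
--             label = x[field]
--             if label.startswith("B-"):  # and lastLabel!="O" and lastLabel: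
--                 atype.append(label.split(":")[0])
--                 if doc[-1] != []:
--                     doc.append([])
--             elif label.startswith("O") and lastLabel != "O" and lastLabel:
--                 atype.append(None)
--                 if doc[-1] != []:
--                     doc.append([])
--             elif label.startswith("O") and lastLabel != "O":
--                 atype.append(None)
--             doc[-1].append(line)
--             lastLabel = label[0]
--     if doc != [[]]:
--         docs.append(doc)
--         argTypes.append(atype)
--     return docs, argTypes
-- ===== SOURCE B (Python) =====
-- def readDocsFine(lines, field, delimiter="\t"):
--     # Pass 1: chunk raw lines into document groups at blank (stripped-empty) lines.
--     groups = []
--     cur = []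
--     for line in lines:
--         if line.strip() == "":
--             if cur:
--                 groups.append(cur)
--             cur = []
--         else:
--             cur.append(line)
--     if cur:
--         groups.append(cur)
--     # Pass 2: per group, precompute labels and previous-label first chars,
--     # then fold once over the zipped triples to build segments and arg types.
--     docs = []
--     argTypes = []
--     for g in groups:
--         labels = [line.strip().split(delimiter)[field] for line in g]
--         prevs = [None] + [lab[0] for lab in labels]
--         doc = []
--         seg = []
--         atype = []
--         for line, lab, pl in zip(g, labels, prevs):
--             s = line.strip()
--             if lab.startswith("B-"):
--                 atype.append(lab.split(":")[0])
--                 brk = True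
--             elif lab.startswith("O") and pl != "O":
--                 atype.append(None)
--                 brk = pl is not None
--             else:
--                 brk = False
--             if brk and seg:
--                 doc.append(seg)
--                 seg = []
--             seg.append(s)
--         doc.append(seg)
--         docs.append(doc)
--         argTypes.append(atype)
--     return docs, argTypes
-- ===== Notes on version B (the rewrite author's own statement) =====
-- stated objective: alternative
-- what changed: A runs one monolithic fold with five pieces of mutable state (docs, doc, atype, lastLabel) and blank-line resets; B first chunks the raw lines into document groups at blank lines, then segments each group independently from precomputed per-line labels zipped with the previous label's first character, so no cross-document state survives.
import Mathlib
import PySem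

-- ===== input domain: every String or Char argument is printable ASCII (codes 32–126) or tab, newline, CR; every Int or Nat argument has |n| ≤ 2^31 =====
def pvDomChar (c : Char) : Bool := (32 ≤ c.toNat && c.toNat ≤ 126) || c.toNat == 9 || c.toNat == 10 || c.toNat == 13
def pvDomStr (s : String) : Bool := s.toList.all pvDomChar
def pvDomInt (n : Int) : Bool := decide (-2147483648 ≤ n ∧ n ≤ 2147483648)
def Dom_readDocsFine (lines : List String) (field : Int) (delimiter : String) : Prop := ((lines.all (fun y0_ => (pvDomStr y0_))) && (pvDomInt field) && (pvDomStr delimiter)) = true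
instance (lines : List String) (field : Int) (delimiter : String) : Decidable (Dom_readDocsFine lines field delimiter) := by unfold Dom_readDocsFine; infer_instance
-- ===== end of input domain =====

-- B splits the work into two passes (chunk raw lines into documents at blank lines, then segment each
-- document from precomputed label/previous-label triples); same return value, objective: alternative decomposition.

-- ===== PORT A =====
-- A's single fold state: (docs, argTypes, doc, atype, lastLabel); lastLabel is Python's
-- `label[0]` (a 1-char string) modelled as Option Char (`none` = Python None).
-- `x[field]` / `label[0]` use pyGet? with a `.getD` default; Pre_ excludes the inputs where Python raises there.
def pvAppendLast (xss : List (List String)) (v : String) : List (List String) :=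
  xss.dropLast ++ [(xss.getLast?.getD []) ++ [v]]

def pvAStep (field : Int) (delimiter : String)
    (st : List (List (List String)) × List (List (Option String)) × List (List String) × List (Option String) × Option Char)
    (line : String) :
    List (List (List String)) × List (List (Option String)) × List (List String) × List (Option String) × Option Char :=
  let l := PySem.Str.strip line
  let docs := st.1
  let ats := st.2.1
  let doc := st.2.2.1
  let atype := st.2.2.2.1
  let lastLabel := st.2.2.2.2
  if l = "" then
    if doc ≠ [[]] then (docs ++ [doc], ats ++ [atype], [[]], [], none)
    else (docs, ats, [[]], [], none)
  else
    let x := (PySem.Str.split? l delimiter).getD []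
    let label := (PySem.List.pyGet? x field).getD ""
    let da :=
      if PySem.Str.startswith label "B-" = true then
        (if PySem.List.pyGetD doc (-1) ([] : List String) ≠ [] then doc ++ [[]] else doc,
         atype ++ [some ((PySem.List.pyGet? ((PySem.Str.split? label ":").getD []) 0).getD "")])
      else if PySem.Str.startswith label "O" = true ∧ lastLabel ≠ some 'O' ∧ lastLabel ≠ none then
        (if PySem.List.pyGetD doc (-1) ([] : List String) ≠ [] then doc ++ [[]] else doc,
         atype ++ [(none : Option String)])
      else if PySem.Str.startswith label "O" = true ∧ lastLabel ≠ some 'O' then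
        (doc, atype ++ [(none : Option String)])
      else (doc, atype)
    (docs, ats, pvAppendLast da.1 l, da.2, PySem.Str.pyGet? label 0)

def readDocsFine (lines : List String) (field : Int) (delimiter : String) :
    List (List (List String)) × List (List (Option String)) :=
  let st := lines.foldl (pvAStep field delimiter) ([], [], [[]], [], none)
  if st.2.2.1 ≠ [[]] then (st.1 ++ [st.2.2.1], st.2.1 ++ [st.2.2.2.1])
  else (st.1, st.2.1)

-- ===== PORT B =====
-- Pass 1: group raw lines into documents at blank (stripped-empty) lines, dropping empty groups.
def pvGroupStep (st : List (List String) × List String) (line : String) :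
    List (List String) × List String :=
  if PySem.Str.strip line = "" then
    if st.2 ≠ [] then (st.1 ++ [st.2], []) else (st.1, [])
  else (st.1, st.2 ++ [line])

-- label of one raw line: line.strip().split(delimiter)[field]
def pvLabelOf (field : Int) (delimiter : String) (line : String) : String :=
  (PySem.List.pyGet? ((PySem.Str.split? (PySem.Str.strip line) delimiter).getD []) field).getD ""

-- Pass 2 inner step over one zipped triple (line, its label, previous label's first char).
def pvBStep (st : List (List String) × List String × List (Option String))
    (t : String × String × Option Char) :
    List (List String) × List String × List (Option String) :=
  let line := t.1
  let lab := t.2.1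
  let pl := t.2.2
  let s := PySem.Str.strip line
  let r :=
    if PySem.Str.startswith lab "B-" = true then
      (st.1, st.2.1, st.2.2 ++ [some ((PySem.List.pyGet? ((PySem.Str.split? lab ":").getD []) 0).getD "")], true)
    else if PySem.Str.startswith lab "O" = true ∧ pl ≠ some 'O' then
      (st.1, st.2.1, st.2.2 ++ [(none : Option String)], pl.isSome)
    else (st.1, st.2.1, st.2.2, false)
  if r.2.2.2 = true ∧ r.2.1 ≠ [] then (r.1 ++ [r.2.1], [s], r.2.2.1)
  else (r.1, r.2.1 ++ [s], r.2.2.1)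

def pvPerGroup (field : Int) (delimiter : String) (g : List String) :
    List (List String) × List (Option String) :=
  let labels := g.map (pvLabelOf field delimiter)
  let prevs := (none : Option Char) :: labels.map (fun l => PySem.Str.pyGet? l 0)
  let st := (g.zip (labels.zip prevs)).foldl pvBStep ([], [], [])
  (st.1 ++ [st.2.1], st.2.2)

def readDocsFine_alt (lines : List String) (field : Int) (delimiter : String) :
    List (List (List String)) × List (List (Option String)) :=
  let gc := lines.foldl pvGroupStep ([], [])
  let groups := gc.1 ++ (if gc.2 ≠ [] then [gc.2] else [])
  let rs := groups.map (pvPerGroup field delimiter)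
  (rs.map Prod.fst, rs.map Prod.snd)

-- ===== PRECONDITION & SPEC =====
-- Pre_ excludes exactly the inputs on which the Python A raises: a non-blank line with an empty
-- delimiter (ValueError in split), a `field` index out of range of the split (IndexError), or an
-- empty selected label (IndexError at label[0]).
def Pre_readDocsFine (lines : List String) (field : Int) (delimiter : String) : Prop :=
  ∀ line ∈ lines, PySem.Str.strip line ≠ "" →
    delimiter ≠ "" ∧
    PySem.Raise.InRange ((PySem.Str.split? (PySem.Str.strip line) delimiter).getD []).length field ∧
    (PySem.List.pyGet? ((PySem.Str.split? (PySem.Str.strip line) delimiter).getD []) field).getD "" ≠ ""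
instance (lines : List String) (field : Int) (delimiter : String) : Decidable (Pre_readDocsFine lines field delimiter) := by unfold Pre_readDocsFine; infer_instance
def pvWitness_readDocsFine : List String × Int × String :=
  (["tok\tB-claim:maj", "tok\tI-claim", "", "w\tO"], 1, "\t")

def Spec_readDocsFine (lines : List String) (field : Int) (delimiter : String) (out : List (List (List String)) × List (List (Option String))) : Prop := out = readDocsFine_alt lines field delimiter
instance (lines : List String) (field : Int) (delimiter : String) (out : List (List (List String)) × List (List (Option String))) : Decidable (Spec_readDocsFine lines field delimiter out) := by unfold Spec_readDocsFine; infer_instance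

-- ===== CLAIM (what is proved, stated in full; the proofs are below) =====
def Claim_equal_readDocsFine : Prop := ∀ (lines : List String) (field : Int) (delimiter : String), Dom_readDocsFine lines field delimiter → Pre_readDocsFine lines field delimiter → Spec_readDocsFine lines field delimiter (readDocsFine lines field delimiter)

-- ===== LEMMAS AND PROOFS =====

-- proof-side runner: B's inner fold with the label and previous-char threading made recursive
def pvRunStep (field : Int) (delimiter : String)
    (st : List (List String) × List String × List (Option String) × Option Char) (line : String) :
    List (List String) × List String × List (Option String) × Option Char :=
  let lab := pvLabelOf field delimiter line
  let r := pvBStep (st.1, st.2.1, st.2.2.1) (line, lab, st.2.2.2)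
  (r.1, r.2.1, r.2.2, PySem.Str.pyGet? lab 0)

-- B's zipped fold over a whole group equals the runner
lemma pvZip_eq_run (field : Int) (delimiter : String) (g : List String)
    (st : List (List String) × List String × List (Option String)) (p : Option Char) :
    (g.zip ((g.map (pvLabelOf field delimiter)).zip
        (p :: (g.map (pvLabelOf field delimiter)).map (fun l => PySem.Str.pyGet? l 0)))).foldl
      pvBStep st
    = ((g.foldl (pvRunStep field delimiter) (st.1, st.2.1, st.2.2, p)).1,
       (g.foldl (pvRunStep field delimiter) (st.1, st.2.1, st.2.2, p)).2.1,
       (g.foldl (pvRunStep field delimiter) (st.1, st.2.1, st.2.2, p)).2.2.1) := by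
  induction g generalizing st p with
  | nil => rfl
  | cons x g ih =>
    simp only [List.map_cons, List.zip_cons_cons, List.foldl_cons]
    exact ih (pvBStep st (x, pvLabelOf field delimiter x, p))
      (PySem.Str.pyGet? (pvLabelOf field delimiter x) 0)

lemma pvRunStep_seg_ne (field : Int) (delimiter : String)
    (st : List (List String) × List String × List (Option String) × Option Char) (line : String) :
    (pvRunStep field delimiter st line).2.1 ≠ [] := by
  simp only [pvRunStep, pvBStep]
  split_ifs <;> simp

lemma pvRun_seg_ne (field : Int) (delimiter : String) (cur : List String) (hcur : cur ≠ [])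
    (st : List (List String) × List String × List (Option String) × Option Char) :
    (cur.foldl (pvRunStep field delimiter) st).2.1 ≠ [] := by
  rw [← List.dropLast_concat_getLast hcur, List.foldl_append]
  simp only [List.foldl_cons, List.foldl_nil]
  exact pvRunStep_seg_ne field delimiter _ _

lemma pvAppendLast_concat (xs : List (List String)) (y : List String) (v : String) :
    pvAppendLast (xs ++ [y]) v = xs ++ [y ++ [v]] := by
  simp [pvAppendLast]

lemma pvAppendLast_concat2 (d : List (List String)) (s y : List String) (v : String) :
    pvAppendLast (d ++ [s, y]) v = d ++ [s, y ++ [v]] := by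
  rw [show d ++ [s, y] = (d ++ [s]) ++ [y] by simp, pvAppendLast_concat]
  simp

-- A's non-blank step in terms of B's runner
lemma pvAStep_nonblank (field : Int) (delimiter : String) (line : String)
    (h : PySem.Str.strip line ≠ "")
    (docs : List (List (List String))) (ats : List (List (Option String)))
    (d : List (List String)) (s : List String) (t : List (Option String)) (p : Option Char) :
    pvAStep field delimiter (docs, ats, d ++ [s], t, p) line
    = (docs, ats,
       (pvRunStep field delimiter (d, s, t, p) line).1 ++ [(pvRunStep field delimiter (d, s, t, p) line).2.1],
       (pvRunStep field delimiter (d, s, t, p) line).2.2.1,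
       (pvRunStep field delimiter (d, s, t, p) line).2.2.2) := by
  simp only [pvAStep, pvRunStep, pvBStep, pvLabelOf, PySem.List.pyGetD_neg_one_append_singleton]
  rw [if_neg h]
  cases p with
  | none => split_ifs <;> simp_all [pvAppendLast_concat, pvAppendLast_concat2]
  | some c => split_ifs <;> simp_all [pvAppendLast_concat, pvAppendLast_concat2]

-- the grouping fold only appends to the accumulated group list
lemma pvGroupStep_acc (rest : List String) (gs : List (List String)) (c : List String) :
    rest.foldl pvGroupStep (gs, c)
    = (gs ++ (rest.foldl pvGroupStep ([], c)).1, (rest.foldl pvGroupStep ([], c)).2) := by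
  induction rest generalizing gs c with
  | nil => simp
  | cons x rest ih =>
    simp only [List.foldl_cons, pvGroupStep]
    split_ifs with h1 h2
    · rw [ih (gs ++ [c]) []]
      simp only [List.nil_append]
      rw [ih [c] []]
      simp
    · rw [ih gs [], ih ([] : List (List String)) []]
    · rw [ih gs (c ++ [x]), ih ([] : List (List String)) (c ++ [x])]

lemma pvPerGroup_eq_run (field : Int) (delimiter : String) (g : List String) :
    pvPerGroup field delimiter g
    = ((g.foldl (pvRunStep field delimiter) ([], [], [], none)).1
         ++ [(g.foldl (pvRunStep field delimiter) ([], [], [], none)).2.1],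
       (g.foldl (pvRunStep field delimiter) ([], [], [], none)).2.2.1) := by
  simp only [pvPerGroup]
  rw [pvZip_eq_run field delimiter g ([], [], []) none]

lemma pvConcat_ne_singleton_nil (d : List (List String)) (s : List String) (hs : s ≠ []) :
    d ++ [s] ≠ [[]] := by
  intro h
  have h2 := congrArg List.getLast? h
  simp at h2
  exact hs h2

lemma pvMain (field : Int) (delimiter : String) :
    ∀ (lines : List String) (docs : List (List (List String))) (ats : List (List (Option String)))
      (cur : List String),
    (let st := lines.foldl (pvAStep field delimiter)
        (docs, ats,
         (cur.foldl (pvRunStep field delimiter) ([], [], [], none)).1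
           ++ [(cur.foldl (pvRunStep field delimiter) ([], [], [], none)).2.1],
         (cur.foldl (pvRunStep field delimiter) ([], [], [], none)).2.2.1,
         (cur.foldl (pvRunStep field delimiter) ([], [], [], none)).2.2.2);
     if st.2.2.1 ≠ [[]] then (st.1 ++ [st.2.2.1], st.2.1 ++ [st.2.2.2.1]) else (st.1, st.2.1))
    = (docs ++ ((lines.foldl pvGroupStep ([], cur)).1
          ++ (if (lines.foldl pvGroupStep ([], cur)).2 ≠ [] then [(lines.foldl pvGroupStep ([], cur)).2] else [])).map
          (fun g => (pvPerGroup field delimiter g).1),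
       ats ++ ((lines.foldl pvGroupStep ([], cur)).1
          ++ (if (lines.foldl pvGroupStep ([], cur)).2 ≠ [] then [(lines.foldl pvGroupStep ([], cur)).2] else [])).map
          (fun g => (pvPerGroup field delimiter g).2)) := by
  intro lines
  induction lines with
  | nil =>
    intro docs ats cur
    by_cases hcur : cur = []
    · subst hcur
      simp
    · have hseg := pvRun_seg_ne field delimiter cur hcur ([], [], [], none)
      have hne := pvConcat_ne_singleton_nil
          (cur.foldl (pvRunStep field delimiter) ([], [], [], none)).1 _ hseg
      simp only [List.foldl_nil]
      rw [if_pos hne, if_pos hcur]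
      simp [pvPerGroup_eq_run]
  | cons line rest ih =>
    intro docs ats cur
    simp only [List.foldl_cons]
    by_cases hb : PySem.Str.strip line = ""
    · by_cases hcur : cur = []
      · subst hcur
        have hA : pvAStep field delimiter
            (docs, ats,
             (([] : List String).foldl (pvRunStep field delimiter) ([], [], [], none)).1
               ++ [(([] : List String).foldl (pvRunStep field delimiter) ([], [], [], none)).2.1],
             (([] : List String).foldl (pvRunStep field delimiter) ([], [], [], none)).2.2.1,
             (([] : List String).foldl (pvRunStep field delimiter) ([], [], [], none)).2.2.2) line
            = (docs, ats, [[]], [], none) := by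
          simp [pvAStep, hb]
        have hG : pvGroupStep ([], ([] : List String)) line = ([], []) := by
          simp [pvGroupStep, hb]
        rw [hA, hG]
        exact ih docs ats []
      · have hseg := pvRun_seg_ne field delimiter cur hcur ([], [], [], none)
        have hne := pvConcat_ne_singleton_nil
            (cur.foldl (pvRunStep field delimiter) ([], [], [], none)).1 _ hseg
        have hA : pvAStep field delimiter
            (docs, ats,
             (cur.foldl (pvRunStep field delimiter) ([], [], [], none)).1
               ++ [(cur.foldl (pvRunStep field delimiter) ([], [], [], none)).2.1],
             (cur.foldl (pvRunStep field delimiter) ([], [], [], none)).2.2.1,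
             (cur.foldl (pvRunStep field delimiter) ([], [], [], none)).2.2.2) line
            = (docs ++ [(cur.foldl (pvRunStep field delimiter) ([], [], [], none)).1
                 ++ [(cur.foldl (pvRunStep field delimiter) ([], [], [], none)).2.1]],
               ats ++ [(cur.foldl (pvRunStep field delimiter) ([], [], [], none)).2.2.1],
               [[]], [], none) := by
          simp only [pvAStep]
          rw [if_pos hb, if_pos hne]
        have hG : pvGroupStep ([], cur) line = ([cur], []) := by
          simp [pvGroupStep, hb, hcur]
        rw [hA, hG, pvGroupStep_acc rest [cur] []]
        simpa [pvPerGroup_eq_run] using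
          ih (docs ++ [(cur.foldl (pvRunStep field delimiter) ([], [], [], none)).1
                 ++ [(cur.foldl (pvRunStep field delimiter) ([], [], [], none)).2.1]])
            (ats ++ [(cur.foldl (pvRunStep field delimiter) ([], [], [], none)).2.2.1]) []
    · have hG : pvGroupStep ([], cur) line = ([], cur ++ [line]) := by
        simp [pvGroupStep, hb]
      rw [pvAStep_nonblank field delimiter line hb docs ats _ _ _ _, hG]
      have := ih docs ats (cur ++ [line])
      rw [List.foldl_append] at this
      simp only [List.foldl_cons, List.foldl_nil] at this
      exact this

-- ===== VERDICT (by name: the statement is the Claim_ definition above) =====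
theorem readDocsFine_spec : Claim_equal_readDocsFine := by
  intro lines field delimiter _ _
  simpa [readDocsFine, readDocsFine_alt, Spec_readDocsFine, Function.comp]
    using pvMain field delimiter lines [] [] []
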